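-- pv_equiv track=rewrite | github.com/darshanj18/finkraft | Challenge_2/main2.py | get_third_highest_frequency
-- ===== SOURCE A (Python) =====
-- from typing import List, Tuple
--
-- def get_third_highest_frequency(frequencies: List[Tuple[int, int]]) -> Tuple[int, int]:
--     """Retrieve the third highest frequency from the list of (number, frequency) tuples."""
--     # TODO: Implement logic to find the third highest frequency or handle case with less unique numbers.
--     unique_frequencies = sorted(set(freq for num, freq in frequencies), reverse=True)
--     if len(unique_frequencies) < 3:
--         raise ValueError("The list doesn't contain at least three unique frequencies.")
--
--     # Get the third highest frequency
--     third_highest_freq = unique_frequencies[2]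
--
--     # Find the number corresponding to the third highest frequency
--     for number, frequency in frequencies:
--         if frequency == third_highest_freq:
--             return number, frequency
--     pass  # placeholder
-- ===== SOURCE B (Python) =====
-- def get_third_highest_frequency(frequencies):
--     """Three linear max-scans instead of building and sorting the set of frequencies."""
--     freqs = [f for _, f in frequencies]
--     m1 = max(freqs)
--     m2 = max(f for f in freqs if f < m1)
--     m3 = max(f for f in freqs if f < m2)
--     for number, frequency in frequencies:
--         if frequency == m3:
--             return number, frequency
-- ===== Notes on version B (the rewrite author's own statement) =====
-- stated objective: faster
-- what changed: Instead of building a set of frequencies and sorting it descending, B finds the top three distinct frequency values by three linear max-scans (max, max below m1, max below m2), then scans for the first matching pair.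
import Mathlib
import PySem

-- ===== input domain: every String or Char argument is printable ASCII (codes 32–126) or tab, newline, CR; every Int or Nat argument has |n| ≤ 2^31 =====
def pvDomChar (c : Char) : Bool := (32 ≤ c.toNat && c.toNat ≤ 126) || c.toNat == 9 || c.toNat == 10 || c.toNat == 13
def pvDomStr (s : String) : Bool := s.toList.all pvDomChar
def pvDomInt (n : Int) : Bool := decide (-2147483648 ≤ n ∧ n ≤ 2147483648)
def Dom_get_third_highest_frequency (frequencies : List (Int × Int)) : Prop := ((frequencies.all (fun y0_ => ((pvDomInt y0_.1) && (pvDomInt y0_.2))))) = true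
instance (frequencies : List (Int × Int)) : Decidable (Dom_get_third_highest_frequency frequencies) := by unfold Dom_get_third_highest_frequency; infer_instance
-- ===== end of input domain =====

-- B replaces sorted(set(...), reverse=True) by three linear max-scans for the top three
-- distinct frequency values (measured faster; O(n) vs O(n log n)).

-- ===== PORT A =====
def get_third_highest_frequency (frequencies : List (Int × Int)) : Int × Int :=
  let unique_frequencies :=
    PySem.List.sorted (PySem.Set.ofList (frequencies.map (fun p => p.2))) (fun x => x) true
  match unique_frequencies[2]? with
  | none => (0, 0)  -- len(unique_frequencies) < 3: Python raises ValueError, excluded by Pre_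
  | some third_highest_freq =>
    match frequencies.find? (fun p => p.2 == third_highest_freq) with
    | some p => p
    | none => (0, 0)  -- Python falls off the loop (returns None); unreachable under Pre_

-- ===== PORT B =====
def get_third_highest_frequency_alt (frequencies : List (Int × Int)) : Int × Int :=
  let freqs := frequencies.map (fun p => p.2)
  match PySem.List.max? freqs (fun x => x) with
  | none => (0, 0)  -- max([]) raises ValueError, excluded by Pre_
  | some m1 =>
    match PySem.List.max? (freqs.filter (fun f => decide (f < m1))) (fun x => x) with
    | none => (0, 0)  -- max(empty) raises ValueError, excluded by Pre_
    | some m2 =>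
      match PySem.List.max? (freqs.filter (fun f => decide (f < m2))) (fun x => x) with
      | none => (0, 0)  -- max(empty) raises ValueError, excluded by Pre_
      | some m3 =>
        match frequencies.find? (fun p => p.2 == m3) with
        | some p => p
        | none => (0, 0)  -- unreachable: m3 is one of the frequencies

-- ===== PRECONDITION & SPEC =====
-- Pre_: the list contains at least three distinct frequency values; on fewer, both A and B raise ValueError.
def Pre_get_third_highest_frequency (frequencies : List (Int × Int)) : Prop :=
  3 ≤ (PySem.Set.ofList (frequencies.map (fun p => p.2))).length
instance (frequencies : List (Int × Int)) : Decidable (Pre_get_third_highest_frequency frequencies) := by unfold Pre_get_third_highest_frequency; infer_instance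

def pvWitness_get_third_highest_frequency : (List (Int × Int)) := [(1, 5), (2, 3), (3, 8)]

def Spec_get_third_highest_frequency (frequencies : List (Int × Int)) (out : Int × Int) : Prop := out = get_third_highest_frequency_alt frequencies
instance (frequencies : List (Int × Int)) (out : Int × Int) : Decidable (Spec_get_third_highest_frequency frequencies out) := by unfold Spec_get_third_highest_frequency; infer_instance

-- ===== CLAIM (what is proved, stated in full; the proofs are below) =====
def Claim_equal_get_third_highest_frequency : Prop := ∀ (frequencies : List (Int × Int)), Dom_get_third_highest_frequency frequencies → Pre_get_third_highest_frequency frequencies → Spec_get_third_highest_frequency frequencies (get_third_highest_frequency frequencies)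

-- ===== LEMMAS AND PROOFS =====

-- max? of a list whose members are exactly those of h :: t, with every element of t below h, is h.
lemma pv_max_first {l t : List Int} {h : Int}
    (hmem : ∀ x, x ∈ l ↔ x ∈ h :: t) (hlt : ∀ x ∈ t, x < h) :
    PySem.List.max? l (fun x => x) = some h := by
  have hl : h ∈ l := (hmem h).mpr (List.mem_cons_self)
  cases hm : PySem.List.max? l (fun x => x) with
  | none =>
      have hnil : l = [] := (PySem.List.max?_eq_none_iff l fun x => x).mp hm
      subst hnil; simp at hl
  | some m =>
      have hmem' := PySem.List.max?_mem hm
      have hmax := PySem.List.max?_isMax hm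
      have h1 : h ≤ m := hmax h hl
      rcases List.mem_cons.mp ((hmem m).mp hmem') with rfl | hm2
      · rfl
      · exact absurd (hlt m hm2) (by omega)

-- filtering l (same members as u) below a cut keeps exactly the members of t.
lemma pv_filter_lt_mem {l u t : List Int} {cut : Int}
    (hmem : ∀ x, x ∈ l ↔ x ∈ u)
    (h1 : ∀ x ∈ u, x < cut → x ∈ t)
    (h2 : ∀ x ∈ t, x ∈ u ∧ x < cut) :
    ∀ x, x ∈ l.filter (fun f => decide (f < cut)) ↔ x ∈ t := by
  intro x
  simp only [List.mem_filter, decide_eq_true_eq, hmem]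
  exact ⟨fun ⟨hu, hc⟩ => h1 x hu hc, fun ht => h2 x ht⟩

-- ===== VERDICT (by name: the statement is the Claim_ definition above) =====
theorem get_third_highest_frequency_spec : Claim_equal_get_third_highest_frequency := by
  intro fs _ hpre
  unfold Spec_get_third_highest_frequency
  unfold Pre_get_third_highest_frequency at hpre
  set freqs := fs.map (fun p => p.2) with hfr
  set s := PySem.Set.ofList freqs with hs
  set u := PySem.List.sorted s (fun x => x) true with hu
  -- u has the same members as freqs
  have hmem_u : ∀ x, x ∈ freqs ↔ x ∈ u := by
    intro x
    rw [hu, PySem.List.mem_sorted, hs, PySem.Set.mem_ofList]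
  -- u is strictly decreasing
  have hnd : u.Nodup := (PySem.List.sorted_perm ..).nodup_iff.mpr (PySem.Set.nodup_ofList freqs)
  have hdec : u.Pairwise (fun a b => b < a) := by
    have hle : u.Pairwise (fun a b => b ≤ a) := PySem.List.sorted_pairwise_rev ..
    exact (hle.and hnd).imp (fun ⟨hab, hne⟩ => lt_of_le_of_ne hab (Ne.symm hne))
  -- u has at least three elements
  have hlen : 3 ≤ u.length := by rw [hu, PySem.List.length_sorted]; exact hpre
  obtain ⟨a, b, c, rest, hu3⟩ : ∃ a b c rest, u = a :: b :: c :: rest := by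
    match u, hlen with
    | a :: b :: c :: rest, _ => exact ⟨a, b, c, rest, rfl⟩
  rw [hu3] at hmem_u hdec
  have ha_t : ∀ x ∈ b :: c :: rest, x < a := fun x hx => List.rel_of_pairwise_cons hdec hx
  have hb_t : ∀ x ∈ c :: rest, x < b :=
    fun x hx => List.rel_of_pairwise_cons (List.Pairwise.of_cons hdec) hx
  -- A's third highest is c
  have hA3 : u[2]? = some c := by rw [hu3]; rfl
  -- B's three maxima are a, b, c
  have hm1 : PySem.List.max? freqs (fun x => x) = some a :=
    pv_max_first (fun x => hmem_u x) ha_t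
  have hm2 : PySem.List.max? (freqs.filter (fun f => decide (f < a))) (fun x => x) = some b := by
    refine pv_max_first (t := c :: rest)
      (pv_filter_lt_mem (u := a :: b :: c :: rest) (t := b :: c :: rest) (fun y => hmem_u y) ?_ ?_) hb_t
    · intro y hy hlt
      rcases List.mem_cons.mp hy with rfl | hy'
      · omega
      · exact hy'
    · intro y hy
      exact ⟨List.mem_cons_of_mem _ hy, ha_t y hy⟩
  have hm3 : PySem.List.max? (freqs.filter (fun f => decide (f < b))) (fun x => x) = some c := by
    refine pv_max_first (t := rest)
      (pv_filter_lt_mem (u := a :: b :: c :: rest) (t := c :: rest) (fun y => hmem_u y) ?_ ?_)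
      (fun x hx => List.rel_of_pairwise_cons (List.Pairwise.of_cons (List.Pairwise.of_cons hdec)) hx)
    · intro y hy hlt
      have hba : b < a := List.rel_of_pairwise_cons hdec (List.mem_cons_self)
      rcases List.mem_cons.mp hy with rfl | hy'
      · omega
      · rcases List.mem_cons.mp hy' with rfl | hy''
        · omega
        · exact hy''
    · intro y hy
      exact ⟨List.mem_cons_of_mem _ (List.mem_cons_of_mem _ hy), hb_t y hy⟩
  -- both programs now look up the same value c
  simp only [get_third_highest_frequency, get_third_highest_frequency_alt,
    ← hfr, ← hs, ← hu, hA3, hm1, hm2, hm3]
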